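-- pv_equiv track=rewrite | github.com/archivczsk/archivczsk-doplnky | tools_xbmc/dmd_czech/videonet.py | latin2text
-- ===== SOURCE A (Python) =====
-- def latin2text(word):
-- 	dict_hex = {'&#xe1;' : 'á',
-- 				'&#x10d;': 'č',
-- 				'&#x10f;': 'ď',
-- 				'&#xe9;' : 'é',
-- 				'&#x11b;': 'ě',
-- 				'&#xed;' : 'í',
-- 				'&#xf1;' : 'ñ',
-- 				'&#xf3;' : 'ó',
-- 				'&#x159;': 'ř',
-- 				'&#x161;': 'š',
-- 				'&#x165;': 'ť',
-- 				'&#xfa;' : 'ú',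
-- 				'&#xfc;' : 'ü',
-- 				'&#xfd;' : 'ý',
-- 				'&#x17e;': 'ž',
-- 				}
-- 	for key in list(dict_hex.keys()):
-- 		word = word.replace(key,dict_hex[key])
-- 	return word
-- ===== SOURCE B (Python) =====
-- # Single left-to-right pass: at each position try the entity table once, instead of 15 full-string replace scans.
-- _ENTITIES = [('&#xe1;', 'á'), ('&#x10d;', 'č'), ('&#x10f;', 'ď'), ('&#xe9;', 'é'),
--              ('&#x11b;', 'ě'), ('&#xed;', 'í'), ('&#xf1;', 'ñ'), ('&#xf3;', 'ó'),
--              ('&#x159;', 'ř'), ('&#x161;', 'š'), ('&#x165;', 'ť'), ('&#xfa;', 'ú'),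
--              ('&#xfc;', 'ü'), ('&#xfd;', 'ý'), ('&#x17e;', 'ž')]
--
-- def latin2text(word):
-- 	out = []
-- 	i = 0
-- 	n = len(word)
-- 	while i < n:
-- 		for key, repl in _ENTITIES:
-- 			if word.startswith(key, i):
-- 				out.append(repl)
-- 				i += len(key)
-- 				break
-- 		else:
-- 			out.append(word[i])
-- 			i += 1
-- 	return ''.join(out)
-- ===== Notes on version B (the rewrite author's own statement) =====
-- stated objective: alternative
-- what changed: Replaces fifteen sequential full-string str.replace passes with a single left-to-right scan that tries the entity table once per position and copies or substitutes in place.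
import Mathlib
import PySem

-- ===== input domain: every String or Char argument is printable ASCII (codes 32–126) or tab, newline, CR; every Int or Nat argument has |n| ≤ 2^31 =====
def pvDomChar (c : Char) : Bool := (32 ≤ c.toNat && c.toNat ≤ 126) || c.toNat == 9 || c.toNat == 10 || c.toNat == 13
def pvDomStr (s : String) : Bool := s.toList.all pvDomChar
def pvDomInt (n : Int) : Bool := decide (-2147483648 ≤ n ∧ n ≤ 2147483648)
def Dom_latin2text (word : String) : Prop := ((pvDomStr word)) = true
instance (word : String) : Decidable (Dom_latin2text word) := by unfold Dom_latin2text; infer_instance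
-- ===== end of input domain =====

-- B replaces A's fifteen sequential full-string replace passes by ONE left-to-right scan that
-- tries the entity table at each position (objective: alternative single-pass algorithm).

-- ===== PORT A =====
def pvDictHex : PySem.Dict String String :=
  PySem.Dict.ofList
    [("&#xe1;", "á"), ("&#x10d;", "č"), ("&#x10f;", "ď"), ("&#xe9;", "é"),
     ("&#x11b;", "ě"), ("&#xed;", "í"), ("&#xf1;", "ñ"), ("&#xf3;", "ó"),
     ("&#x159;", "ř"), ("&#x161;", "š"), ("&#x165;", "ť"), ("&#xfa;", "ú"),
     ("&#xfc;", "ü"), ("&#xfd;", "ý"), ("&#x17e;", "ž")]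

-- 'for key in list(dict_hex.keys()): word = word.replace(key, dict_hex[key])'
-- (dict_hex[key] ported as getD with an unreachable default: every key is in the dict)
def latin2text (word : String) : String :=
  pvDictHex.keys.foldl (fun w key => PySem.Str.replace w key (pvDictHex.getD key "")) word

-- ===== PORT B =====
-- the entity table of Source B, on code points
def pvEntities : List (List Char × List Char) :=
  [(['&','#','x','e','1',';'], ['á']), (['&','#','x','1','0','d',';'], ['č']),
   (['&','#','x','1','0','f',';'], ['ď']), (['&','#','x','e','9',';'], ['é']),
   (['&','#','x','1','1','b',';'], ['ě']), (['&','#','x','e','d',';'], ['í']),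
   (['&','#','x','f','1',';'], ['ñ']), (['&','#','x','f','3',';'], ['ó']),
   (['&','#','x','1','5','9',';'], ['ř']), (['&','#','x','1','6','1',';'], ['š']),
   (['&','#','x','1','6','5',';'], ['ť']), (['&','#','x','f','a',';'], ['ú']),
   (['&','#','x','f','c',';'], ['ü']), (['&','#','x','f','d',';'], ['ý']),
   (['&','#','x','1','7','e',';'], ['ž'])]

-- Source B's while-loop: at position i try the keys in order ('for … break / else'); on a match emit
-- the replacement and advance by the key's length, otherwise copy one character.
def pvScan (P : List (List Char × List Char)) : List Char → List Char
  | [] => []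
  | c :: t =>
    match List.find? (fun p => p.1.isPrefixOf (c :: t)) P with
    | some p => p.2 ++ pvScan P (t.drop (p.1.length - 1))
    | none => c :: pvScan P t
termination_by s => s.length
decreasing_by all_goals simp

def latin2text_alt (word : String) : String := String.ofList (pvScan pvEntities word.toList)

-- ===== PRECONDITION & SPEC =====
def Spec_latin2text (word : String) (out : String) : Prop := out = latin2text_alt word
instance (word : String) (out : String) : Decidable (Spec_latin2text word out) := by unfold Spec_latin2text; infer_instance

-- ===== CLAIM (what is proved, stated in full; the proofs are below) =====
def Claim_equal_latin2text : Prop := ∀ (word : String), Dom_latin2text word → Spec_latin2text word (latin2text word)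

-- ===== LEMMAS AND PROOFS =====

-- recursive characterisation of Python str.replace for a nonempty pattern
def pvRepc (k r : List Char) : List Char → List Char
  | [] => []
  | c :: t => if k.isPrefixOf (c :: t) then r ++ pvRepc k r (t.drop (k.length - 1)) else c :: pvRepc k r t
termination_by s => s.length
decreasing_by all_goals simp

-- the well-behavedness of the entity table that makes the single pass equal the 15 passes
def pvGood (P : List (List Char × List Char)) : Prop :=
  (∀ p ∈ P, p.1.head? = some '&' ∧ '&' ∉ p.1.tail ∧ '&' ∉ p.2 ∧ p.2 ≠ []) ∧
  List.Pairwise (fun a b => ¬(a.1 <+: b.1) ∧ ¬(b.1 <+: a.1)) P ∧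
  (∀ p ∈ P, ∀ q ∈ P, ∀ c ∈ p.2, c ∉ q.1)

def pvApplyAll (P : List (List Char × List Char)) (s : List Char) : List Char :=
  P.foldl (fun w p => pvRepc p.1 p.2 w) s

theorem pvGood_sub {a : List Char × List Char} {P : List (List Char × List Char)}
    (h : pvGood (a :: P)) : pvGood P := by
  obtain ⟨h1, h2, h3⟩ := h
  exact ⟨fun p hp => h1 p (List.mem_cons_of_mem _ hp), (List.pairwise_cons.mp h2).2,
    fun p hp q hq => h3 p (List.mem_cons_of_mem _ hp) q (List.mem_cons_of_mem _ hq)⟩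

theorem pvRepc_nil (k r : List Char) : pvRepc k r [] = [] := by simp [pvRepc]

theorem pvRepc_cons_neg {k : List Char} (r : List Char) {c : Char} {t : List Char}
    (h : ¬ k <+: (c :: t)) : pvRepc k r (c :: t) = c :: pvRepc k r t := by
  rw [pvRepc, if_neg (by simpa [List.isPrefixOf_iff_prefix] using h)]

theorem pvRepc_match {k : List Char} (r : List Char) (X : List Char) (hk : k ≠ []) :
    pvRepc k r (k ++ X) = r ++ pvRepc k r X := by
  obtain ⟨c, kt, rfl⟩ := List.exists_cons_of_ne_nil hk
  rw [List.cons_append, pvRepc, if_pos (by simp [List.isPrefixOf_iff_prefix])]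
  simp

theorem pvRepc_head_ne {k : List Char} (r : List Char) {c : Char} {t : List Char}
    (hk : k.head? = some '&') (hc : c ≠ '&') : pvRepc k r (c :: t) = c :: pvRepc k r t := by
  refine pvRepc_cons_neg r fun h => ?_
  have hkne : k ≠ [] := by rintro rfl; simp at hk
  obtain ⟨k0, kt, rfl⟩ := List.exists_cons_of_ne_nil hkne
  simp only [List.head?_cons, Option.some.injEq] at hk
  exact hc (by simpa [hk] using (List.cons_prefix_cons.mp h).1.symm)

theorem pvRepc_ampfree {k : List Char} (r : List Char) (hk : k.head? = some '&') :
    ∀ (u v : List Char), '&' ∉ u → pvRepc k r (u ++ v) = u ++ pvRepc k r v := by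
  intro u
  induction u with
  | nil => simp
  | cons c u ih =>
    intro v hu
    rw [List.cons_append, pvRepc_head_ne r hk (by simp at hu; exact fun h => hu.1 h.symm),
      ih v (by simp at hu; exact hu.2), List.cons_append]

-- prefix reflection: a '&'-free pattern tail that avoids the replacement characters and is a
-- prefix AFTER one replace pass was already a prefix before it
theorem pvRefl {k r : List Char} (hk : k ≠ []) (hr : r ≠ []) :
    ∀ (t pt : List Char), (∀ c ∈ r, c ∉ pt) → pt <+: pvRepc k r t → pt <+: t := by
  intro t
  induction t using pvRepc.induct (k := k) with
  | case1 => intro pt _ h; simpa [pvRepc_nil] using h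
  | case2 c t hpre ih =>
    rw [List.isPrefixOf_iff_prefix] at hpre
    obtain ⟨X, hX⟩ := hpre
    intro pt hdisj h
    rw [← hX] at h ⊢
    rw [pvRepc_match r X hk] at h
    rcases pt with _ | ⟨p0, pt'⟩
    · exact List.nil_prefix
    · exfalso
      obtain ⟨r0, rt, rfl⟩ := List.exists_cons_of_ne_nil hr
      have : p0 = r0 := (List.cons_prefix_cons.mp (by simpa using h)).1
      exact hdisj r0 (by simp) (by simp [this])
  | case3 c t hpre ih =>
    have hnp : ¬ k <+: (c :: t) := by simpa [List.isPrefixOf_iff_prefix] using hpre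
    intro pt hdisj h
    rw [pvRepc_cons_neg r hnp] at h
    rcases pt with _ | ⟨p0, pt'⟩
    · exact List.nil_prefix
    · obtain ⟨h1, h2⟩ := List.cons_prefix_cons.mp h
      subst h1
      exact List.cons_prefix_cons.mpr ⟨rfl,
        ih pt' (fun c hc hm => hdisj c hc (List.mem_cons_of_mem _ hm)) h2⟩

theorem pvApplyAll_nil (P : List (List Char × List Char)) : pvApplyAll P [] = [] := by
  induction P with
  | nil => rfl
  | cons p P ih => simpa [pvApplyAll, List.foldl_cons, pvRepc_nil] using ih

theorem pvApplyAll_head_ne {P : List (List Char × List Char)} (hG : pvGood P) {c : Char}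
    (hc : c ≠ '&') : ∀ t, pvApplyAll P (c :: t) = c :: pvApplyAll P t := by
  induction P with
  | nil => intro t; rfl
  | cons p P ih =>
    intro t
    have hk := (hG.1 p (by simp)).1
    rw [pvApplyAll, List.foldl_cons, pvRepc_head_ne p.2 hk hc]
    exact ih (pvGood_sub hG) _

theorem pvApplyAll_ampfree {P : List (List Char × List Char)} (hG : pvGood P)
    {u : List Char} (hu : '&' ∉ u) : ∀ v, pvApplyAll P (u ++ v) = u ++ pvApplyAll P v := by
  induction P with
  | nil => intro v; rfl
  | cons p P ih =>
    intro v
    have hk := (hG.1 p (by simp)).1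
    rw [pvApplyAll, List.foldl_cons, pvRepc_ampfree p.2 hk u v hu]
    exact ih (pvGood_sub hG) _

theorem pvApplyAll_nomatch {P : List (List Char × List Char)} (hG : pvGood P) :
    ∀ t, (∀ p ∈ P, ¬ p.1 <+: ('&' :: t)) →
      pvApplyAll P ('&' :: t) = '&' :: pvApplyAll P t := by
  induction P with
  | nil => intro t _; rfl
  | cons p P ih =>
    intro t hnm
    obtain ⟨hk, hkt, hr, hrne⟩ := hG.1 p (by simp)
    have hkne : p.1 ≠ [] := by rintro h; rw [h] at hk; simp at hk
    rw [pvApplyAll, List.foldl_cons, pvRepc_cons_neg p.2 (hnm p (by simp))]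
    refine (ih (pvGood_sub hG) _ ?_).trans rfl
    intro q hq hpre
    have hqmem := List.mem_cons_of_mem p hq
    have hqne : q.1 ≠ [] := by
      intro h; have := (hG.1 q hqmem).1; rw [h] at this; simp at this
    obtain ⟨q0, qt, hqeq⟩ := List.exists_cons_of_ne_nil hqne
    have hq0 : q0 = '&' := by
      have := (hG.1 q hqmem).1; rw [hqeq] at this; simpa using this
    rw [hqeq, hq0] at hpre
    obtain ⟨-, h2⟩ := List.cons_prefix_cons.mp hpre
    have hdisj : ∀ c ∈ p.2, c ∉ qt := by
      intro c hc hm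
      exact hG.2.2 p (by simp) q hqmem c hc (by rw [hqeq, hq0]; exact List.mem_cons_of_mem _ hm)
    refine hnm q hqmem ?_
    rw [hqeq, hq0]
    exact List.cons_prefix_cons.mpr ⟨rfl, pvRefl hkne hrne t qt hdisj h2⟩

theorem pvApplyAll_match {P : List (List Char × List Char)} (hG : pvGood P)
    {p : List Char × List Char} (hp : p ∈ P) :
    ∀ X, pvApplyAll P (p.1 ++ X) = p.2 ++ pvApplyAll P X := by
  induction P with
  | nil => simp at hp
  | cons q P ih =>
    intro X
    obtain ⟨hqh, hqt, hqr, hqrne⟩ := hG.1 q (by simp)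
    have hqne : q.1 ≠ [] := by rintro h; rw [h] at hqh; simp at hqh
    rcases List.mem_cons.mp hp with rfl | hp'
    · rw [pvApplyAll, List.foldl_cons, pvRepc_match p.2 X hqne]
      exact pvApplyAll_ampfree (pvGood_sub hG) hqr _
    · obtain ⟨hph, hpt, hpr, hprne⟩ := hG.1 p (List.mem_cons_of_mem _ hp')
      have hpne : p.1 ≠ [] := by rintro h; rw [h] at hph; simp at hph
      have hpair := (List.pairwise_cons.mp hG.2.1).1 p hp'
      have hnm : ¬ q.1 <+: (p.1 ++ X) := by
        intro h
        rcases List.prefix_or_prefix_of_prefix h (List.prefix_append p.1 X) with h' | h'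
        · exact hpair.1 h'
        · exact hpair.2 h'
      obtain ⟨p0, pt, hps⟩ := List.exists_cons_of_ne_nil hpne
      have hp0 : p0 = '&' := by rw [hps] at hph; simpa using hph
      subst hp0
      have hptfree : '&' ∉ pt := by rw [hps] at hpt; simpa using hpt
      rw [pvApplyAll, List.foldl_cons, hps, List.cons_append,
        pvRepc_cons_neg q.2 (by rw [hps, List.cons_append] at hnm; exact hnm),
        pvRepc_ampfree q.2 hqh pt X hptfree, ← List.cons_append, ← hps]
      exact ih (pvGood_sub hG) hp' _

theorem pvFind_match {P : List (List Char × List Char)} (hG : pvGood P)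
    {p : List Char × List Char} (hp : p ∈ P) (X : List Char) :
    List.find? (fun q => q.1.isPrefixOf (p.1 ++ X)) P = some p := by
  induction P with
  | nil => simp at hp
  | cons q P ih =>
    rcases List.mem_cons.mp hp with rfl | hp'
    · rw [List.find?_cons_of_pos]
      simp [List.isPrefixOf_iff_prefix]
    · have hpair := (List.pairwise_cons.mp hG.2.1).1 p hp'
      have hnm : ¬ q.1 <+: (p.1 ++ X) := by
        intro h
        rcases List.prefix_or_prefix_of_prefix h (List.prefix_append p.1 X) with h' | h'
        · exact hpair.1 h'
        · exact hpair.2 h'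
      rw [List.find?_cons_of_neg (by simpa [List.isPrefixOf_iff_prefix] using hnm)]
      exact ih (pvGood_sub hG) hp'

theorem pvScan_match {P : List (List Char × List Char)} (hG : pvGood P)
    {p : List Char × List Char} (hp : p ∈ P) (X : List Char) :
    pvScan P (p.1 ++ X) = p.2 ++ pvScan P X := by
  have hph := (hG.1 p hp).1
  have hpne : p.1 ≠ [] := by intro h; rw [h] at hph; simp at hph
  obtain ⟨p0, pt, hps⟩ := List.exists_cons_of_ne_nil hpne
  conv_lhs => rw [hps, List.cons_append, pvScan]
  rw [← List.cons_append, ← hps, pvFind_match hG hp X]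
  simp [hps]

theorem pvScan_nomatch {P : List (List Char × List Char)} {c : Char} {t : List Char}
    (h : ∀ p ∈ P, ¬ p.1 <+: (c :: t)) : pvScan P (c :: t) = c :: pvScan P t := by
  rw [pvScan, List.find?_eq_none.mpr]
  intro p hp
  simpa [List.isPrefixOf_iff_prefix] using h p hp

theorem pvMain {P : List (List Char × List Char)} (hG : pvGood P) :
    ∀ s, pvApplyAll P s = pvScan P s := by
  intro s
  induction hn : s.length using Nat.strong_induction_on generalizing s with
  | _ n ih =>
  subst hn
  rcases s with _ | ⟨c, t⟩
  · rw [pvApplyAll_nil, pvScan]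
  by_cases h : ∃ p ∈ P, p.1 <+: (c :: t)
  · obtain ⟨p, hp, X, hX⟩ := h
    have hpne : p.1 ≠ [] := by
      rintro hnil
      have := (hG.1 p hp).1; rw [hnil] at this; simp at this
    rw [← hX, pvApplyAll_match hG hp, pvScan_match hG hp,
      ih X.length (by rw [← hX]; simp; exact List.length_pos_iff.mpr hpne) X rfl]
  · push Not at h
    rw [pvScan_nomatch h]
    by_cases hc : c = '&'
    · subst hc
      rw [pvApplyAll_nomatch hG t h, ih t.length (by simp) t rfl]
    · rw [pvApplyAll_head_ne hG hc t, ih t.length (by simp) t rfl]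

theorem pvDisj_entities : ∀ p ∈ pvEntities, ∀ q ∈ pvEntities, ∀ c ∈ p.2, c ∉ q.1 := by
  have h : (pvEntities.all fun p => pvEntities.all fun q =>
      p.2.all fun c => decide (c ∉ q.1)) = true := by rfl
  intro p hp q hq c hc
  exact of_decide_eq_true (List.all_eq_true.mp (List.all_eq_true.mp
    (List.all_eq_true.mp h p hp) q hq) c hc)

set_option maxRecDepth 10000 in
theorem pvGood_entities : pvGood pvEntities := by
  exact ⟨by decide, by decide, pvDisj_entities⟩

-- bridge: A's fold of Str.replace over the dict computes pvApplyAll on code points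
theorem pvReplace_eq_repc (s : List Char) {k : List Char} (r : List Char) (hk : k ≠ []) :
    PySem.Chars.replace s k r = pvRepc k r s := by
  have go_spec : ∀ fuel (l acc : List Char), l.length ≤ fuel →
      PySem.Chars.replace.go k r fuel l acc = acc.reverse ++ pvRepc k r l := by
    intro fuel
    induction fuel with
    | zero =>
      intro l acc hl
      rw [Nat.le_zero, List.length_eq_zero_iff] at hl
      subst hl
      rw [PySem.Chars.replace.go, pvRepc_nil]
    | succ fuel ih =>
      intro l acc hl
      rcases l with _ | ⟨c, t⟩
      · simp [PySem.Chars.replace.go, pvRepc_nil]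
      rw [PySem.Chars.replace.go]
      by_cases hpre : k.isPrefixOf (c :: t)
      · rw [if_pos hpre, pvRepc, if_pos hpre, ih _ _ ?_]
        · obtain ⟨k0, kt, rfl⟩ := List.exists_cons_of_ne_nil hk
          simp
        · have h1 : 1 ≤ k.length := List.length_pos_iff.mpr hk
          simp only [List.length_drop, List.length_cons] at *
          omega
      · rw [if_neg hpre, pvRepc, if_neg hpre, ih _ _ (by simpa using Nat.le_of_succ_le_succ (by simpa using hl))]
        simp
  rw [PySem.Chars.replace, if_neg (by simpa [List.isEmpty_iff] using hk)]
  exact go_spec s.length s [] le_rfl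

theorem pvFold_bridge (L : List (String × String)) (h : ∀ p ∈ L, p.1.toList ≠ []) :
    ∀ w : String,
      (List.foldl (fun w (p : String × String) => PySem.Str.replace w p.1 p.2) w L).toList
        = pvApplyAll (L.map (fun p => (p.1.toList, p.2.toList))) w.toList := by
  induction L with
  | nil => intro w; rfl
  | cons p L ih =>
    intro w
    rw [List.foldl_cons, ih (fun q hq => h q (List.mem_cons_of_mem _ hq)) _, List.map_cons]
    simp only [pvApplyAll, List.foldl_cons]
    rw [PySem.Str.toList_replace, pvReplace_eq_repc w.toList p.2.toList (h p (by simp))]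

theorem pvA_eq (word : String) :
    (latin2text word).toList = pvApplyAll pvEntities word.toList := by
  have h1 : latin2text word =
      List.foldl (fun w (p : String × String) => PySem.Str.replace w p.1 p.2) word
        [("&#xe1;", "á"), ("&#x10d;", "č"), ("&#x10f;", "ď"), ("&#xe9;", "é"),
         ("&#x11b;", "ě"), ("&#xed;", "í"), ("&#xf1;", "ñ"), ("&#xf3;", "ó"),
         ("&#x159;", "ř"), ("&#x161;", "š"), ("&#x165;", "ť"), ("&#xfa;", "ú"),
         ("&#xfc;", "ü"), ("&#xfd;", "ý"), ("&#x17e;", "ž")] := rfl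
  rw [h1, pvFold_bridge _ (by decide)]
  congr 1

-- ===== VERDICT (by name: the statement is the Claim_ definition above) =====
theorem latin2text_spec : Claim_equal_latin2text := by
  intro word _
  unfold Spec_latin2text latin2text_alt
  apply String.toList_inj.mp
  rw [pvA_eq, pvMain pvGood_entities]
  simp [String.toList_ofList]
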